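-- pv_equiv track=rewrite | github.com/Dunkkai/Is_group | 2.py | is_set_closed
-- ===== SOURCE A (Python) =====
-- def is_set_closed(header: list, table:list[list[str]]) -> bool:
--     all_letters = set()
--     for az in range(len(table)):
--         for buki in range(len(table[az])):
--             all_letters.add(table[az][buki])
--     if all_letters.issubset(header):
--         return True
--     else:
--         return False
-- ===== SOURCE B (Python) =====
-- def _subset_sorted(xs, ys):
--     # xs, ys strictly increasing; is xs a sub-collection of ys? (merge scan)
--     if not xs:
--         return True
--     if not ys:
--         return False
--     if ys[0] < xs[0]:
--         return _subset_sorted(xs, ys[1:])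
--     if ys[0] == xs[0]:
--         return _subset_sorted(xs[1:], ys[1:])
--     return False
--
-- def is_set_closed(header: list, table: list[list[str]]) -> bool:
--     cells = sorted({cell for row in table for cell in row})
--     allowed = sorted(set(header))
--     return _subset_sorted(cells, allowed)
-- ===== Notes on version B (the rewrite author's own statement) =====
-- stated objective: alternative
-- what changed: B sorts the distinct table cells and the distinct header letters and decides subset by a recursive two-pointer merge scan over the two sorted lists, instead of A's hash-set accumulation plus issubset.
import Mathlib
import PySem

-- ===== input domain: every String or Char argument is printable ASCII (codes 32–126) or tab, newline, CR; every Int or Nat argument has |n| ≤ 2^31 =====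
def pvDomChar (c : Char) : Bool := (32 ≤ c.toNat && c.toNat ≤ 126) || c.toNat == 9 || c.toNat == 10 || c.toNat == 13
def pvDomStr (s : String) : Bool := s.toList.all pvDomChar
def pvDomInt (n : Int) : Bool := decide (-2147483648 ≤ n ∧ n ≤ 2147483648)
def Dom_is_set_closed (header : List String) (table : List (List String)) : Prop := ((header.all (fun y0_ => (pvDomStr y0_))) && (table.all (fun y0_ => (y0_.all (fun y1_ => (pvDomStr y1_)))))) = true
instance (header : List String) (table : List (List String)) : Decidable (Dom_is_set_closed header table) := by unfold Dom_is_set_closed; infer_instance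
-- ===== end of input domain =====

-- B decides the same subset question by sorting the distinct cells and distinct header
-- letters and running a recursive two-pointer merge scan (alternative algorithm).

-- ===== PORT A =====
-- the index loops 'for az in range(len(table)): for buki in range(len(table[az]))'
-- visit exactly the rows and, within each row, the cells, in order: ported as folds over those lists
def is_set_closed (header : List String) (table : List (List String)) : Bool :=
  let all_letters : PySem.Set String :=
    table.foldl (fun s row => row.foldl (fun s' cell => PySem.Set.add s' cell) s) PySem.Set.empty
  if PySem.Set.issubset all_letters header then true else false

-- ===== PORT B =====
-- _subset_sorted: merge scan over two strictly increasing lists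
def subsetSorted : List String → List String → Bool
  | [], _ => true
  | _ :: _, [] => false
  | x :: xs, y :: ys =>
      if y < x then subsetSorted (x :: xs) ys
      else if y == x then subsetSorted xs ys
      else false
  termination_by xs ys => xs.length + ys.length

def is_set_closed_alt (header : List String) (table : List (List String)) : Bool :=
  let cells : List String :=
    PySem.List.sorted (PySem.Set.ofList (table.flatMap (fun row => row))) (fun x => x) false
  let allowed : List String :=
    PySem.List.sorted (PySem.Set.ofList header) (fun x => x) false
  subsetSorted cells allowed

-- ===== PRECONDITION & SPEC =====
def Spec_is_set_closed (header : List String) (table : List (List String)) (out : Bool) : Prop := out = is_set_closed_alt header table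
instance (header : List String) (table : List (List String)) (out : Bool) : Decidable (Spec_is_set_closed header table out) := by unfold Spec_is_set_closed; infer_instance

-- ===== CLAIM =====
def Claim_equal_is_set_closed : Prop := ∀ (header : List String) (table : List (List String)), Dom_is_set_closed header table → Spec_is_set_closed header table (is_set_closed header table)

-- ===== LEMMAS AND PROOFS =====

-- membership in the set A accumulates over all rows
theorem mem_accum (table : List (List String)) (s : PySem.Set String) (x : String) :
    x ∈ table.foldl (fun s row => row.foldl (fun s' cell => PySem.Set.add s' cell) s) s ↔
      x ∈ s ∨ ∃ row ∈ table, x ∈ row := by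
  induction table generalizing s with
  | nil => simp
  | cons r rs ih =>
      simp only [List.foldl_cons, ih]
      have : x ∈ r.foldl (fun s' cell => PySem.Set.add s' cell) s ↔ x ∈ s ∨ ∃ b ∈ r, x = b := by
        simpa using PySem.Set.mem_foldl_add (f := fun c : String => c) (l := r) (s := s) (y := x)
      rw [this]
      constructor
      · rintro (⟨h | ⟨b, hb, rfl⟩⟩ | ⟨row, hr, hx⟩)
        · exact Or.inl h
        · exact Or.inr ⟨r, by simp, hb⟩
        · exact Or.inr ⟨row, by simp [hr], hx⟩
      · rintro (h | ⟨row, hr, hx⟩)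
        · exact Or.inl (Or.inl h)
        · rcases List.mem_cons.mp hr with rfl | hr
          · exact Or.inl (Or.inr ⟨x, hx, rfl⟩)
          · exact Or.inr ⟨row, hr, hx⟩

-- the merge scan on strictly increasing lists decides the subset relation
theorem subsetSorted_iff : ∀ (ys xs : List String),
    xs.Pairwise (· < ·) → ys.Pairwise (· < ·) →
    (subsetSorted xs ys = true ↔ ∀ x ∈ xs, x ∈ ys) := by
  intro ys
  induction ys with
  | nil =>
      intro xs _ _
      cases xs with
      | nil => simp [subsetSorted]
      | cons x xs =>
        simp only [subsetSorted, Bool.false_eq_true, false_iff, not_forall]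
        exact ⟨x, List.mem_cons_self, by simp⟩
  | cons y ys ih =>
      intro xs hxs hys
      cases xs with
      | nil => simp [subsetSorted]
      | cons x xs =>
        rw [subsetSorted]
        rcases lt_trichotomy y x with hlt | heq | hgt
        · rw [if_pos hlt, ih (x :: xs) hxs (List.Pairwise.of_cons hys)]
          constructor
          · intro h a ha
            exact List.mem_cons_of_mem _ (h a ha)
          · intro h a ha
            have hya : y < a := by
              rcases List.mem_cons.mp ha with rfl | ha'
              · exact hlt
              · exact lt_trans hlt ((List.pairwise_cons.mp hxs).1 a ha')
            rcases List.mem_cons.mp (h a ha) with rfl | h'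
            · exact absurd hya (lt_irrefl a)
            · exact h'
        · subst heq
          rw [if_neg (lt_irrefl _), if_pos (by simp),
            ih xs (List.Pairwise.of_cons hxs) (List.Pairwise.of_cons hys)]
          constructor
          · intro h a ha
            rcases List.mem_cons.mp ha with rfl | ha'
            · exact List.mem_cons_self
            · exact List.mem_cons_of_mem _ (h a ha')
          · intro h a ha
            have hxa := (List.pairwise_cons.mp hxs).1 a ha
            rcases List.mem_cons.mp (h a (List.mem_cons_of_mem _ ha)) with rfl | h'
            · exact absurd hxa (lt_irrefl a)
            · exact h'
        · rw [if_neg (not_lt_of_gt hgt), if_neg (by simpa using ne_of_gt hgt)]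
          constructor
          · intro h; simp at h
          · intro h
            exfalso
            have hx := h x List.mem_cons_self
            rcases List.mem_cons.mp hx with rfl | hx'
            · exact lt_irrefl x hgt
            · exact not_lt_of_gt hgt ((List.pairwise_cons.mp hys).1 x hx')

-- B's value characterised: subset of the distinct cells in the header
theorem alt_iff (header : List String) (table : List (List String)) :
    is_set_closed_alt header table = true ↔
      ∀ x ∈ table.flatMap (fun row => row), x ∈ header := by
  unfold is_set_closed_alt
  rw [subsetSorted_iff _ _ (PySem.List.sorted_ofList_pairwise_lt _)
    (PySem.List.sorted_ofList_pairwise_lt _)]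
  simp [PySem.List.mem_sorted, PySem.Set.mem_ofList]

-- ===== VERDICT =====
theorem is_set_closed_spec : Claim_equal_is_set_closed := by
  intro header table _
  unfold Spec_is_set_closed
  by_cases h : ∀ x ∈ table.flatMap (fun row => row), x ∈ header
  · rw [(alt_iff header table).mpr h]
    unfold is_set_closed
    rw [if_pos]
    rw [PySem.Set.issubset_iff]
    intro x hx
    rcases (mem_accum table PySem.Set.empty x).mp hx with h0 | ⟨row, hr, hx'⟩
    · simp [PySem.Set.empty] at h0
    · exact h x (List.mem_flatMap.mpr ⟨row, hr, hx'⟩)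
  · have hb : is_set_closed_alt header table = false := by
      rw [← Bool.not_eq_true, alt_iff]; exact h
    rw [hb]
    unfold is_set_closed
    rw [if_neg]
    rw [PySem.Set.issubset_iff]
    intro hsub
    refine h fun x hx => ?_
    rcases List.mem_flatMap.mp hx with ⟨row, hr, hx'⟩
    exact hsub x ((mem_accum table PySem.Set.empty x).mpr (Or.inr ⟨row, hr, hx'⟩))
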